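-- pv_equiv track=rewrite | github.com/DaddyElonMusk69/agentic_terminal | backend/src/app/api/v1/agent_templates.py | _select_primary_interval
-- ===== SOURCE A (Python) =====
-- from typing import Any, Dict, List, Optional
--
-- def _timeframe_minutes(timeframe: str) -> Optional[int]:
--     if not timeframe:
--         return None
--     value = timeframe.strip().lower()
--     if value.endswith("m") and value[:-1].isdigit():
--         return int(value[:-1])
--     if value.endswith("h") and value[:-1].isdigit():
--         return int(value[:-1]) * 60
--     if value.endswith("d") and value[:-1].isdigit():
--         return int(value[:-1]) * 1440
--     return None
--
-- def _select_primary_interval(intervals: List[str]) -> str: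
--     best: Optional[str] = None
--     best_minutes: Optional[int] = None
--     for interval in intervals:
--         minutes = _timeframe_minutes(interval)
--         if minutes is None:
--             if best is None:
--                 best = interval
--             continue
--         if best_minutes is None or minutes > best_minutes:
--             best = interval
--             best_minutes = minutes
--     return best or ""
-- ===== SOURCE B (Python) =====
-- from typing import List, Optional
--
-- def _timeframe_minutes(timeframe: str) -> Optional[int]:
--     v = timeframe.strip().lower()
--     if v and v[:-1].isdigit():
--         mult = {"m": 1, "h": 60, "d": 1440}.get(v[-1])
--         if mult is not None:
--             return int(v[:-1]) * mult
--     return None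
--
-- def _select_primary_interval(intervals: List[str]) -> str:
--     # Decorate-sort-undecorate: sort (-minutes, index) pairs; tuple lex order
--     # makes the head the largest-minutes interval, earliest index on ties.
--     decorated = sorted(
--         (-m, i)
--         for i, iv in enumerate(intervals)
--         if (m := _timeframe_minutes(iv)) is not None
--     )
--     if decorated:
--         return intervals[decorated[0][1]]
--     return intervals[0] if intervals else ""
-- ===== Notes on version B (the rewrite author's own statement) =====
-- stated objective: alternative
-- what changed: B replaces A's single-pass best/best_minutes accumulator scan by decorate-sort-undecorate: it builds (-minutes, index) pairs for the parseable intervals, sorts them (tuple lexicographic order makes the head the largest-minutes, earliest-index interval, reproducing A's strict-> keep-first tie rule), indexes back into the list, and falls back to intervals[0] or '' when nothing parses; the helper uses one digit-check plus a suffix-multiplier table instead of three endswith/isdigit branch repetitions.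
import Mathlib
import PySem

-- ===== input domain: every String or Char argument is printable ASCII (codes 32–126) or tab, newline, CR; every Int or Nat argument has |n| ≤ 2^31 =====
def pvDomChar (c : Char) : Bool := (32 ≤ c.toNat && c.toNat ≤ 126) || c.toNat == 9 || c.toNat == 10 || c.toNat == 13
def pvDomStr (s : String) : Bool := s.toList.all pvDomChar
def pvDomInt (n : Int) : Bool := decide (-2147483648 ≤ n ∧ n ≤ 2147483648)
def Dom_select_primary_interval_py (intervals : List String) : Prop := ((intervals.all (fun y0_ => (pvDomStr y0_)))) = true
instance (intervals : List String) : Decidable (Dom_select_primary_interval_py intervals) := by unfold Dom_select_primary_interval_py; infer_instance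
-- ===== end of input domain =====

-- B replaces A's best/best_minutes accumulator scan by decorate-sort-undecorate over (-minutes, index)
-- pairs (and a table-driven suffix lookup in the helper); objective: alternative, not claimed faster.

-- ===== PORT A =====
def timeframe_minutes (timeframe : String) : Option Int :=
  if PySem.Str.len timeframe = 0 then none
  else
    let value := PySem.Str.lower (PySem.Str.strip timeframe)
    if PySem.Str.endswith value "m" = true ∧
       PySem.Str.strIsdigit (PySem.Str.slice value none (some (-1))) = true then
      PySem.Int.ofStr? (PySem.Str.slice value none (some (-1)))
    else if PySem.Str.endswith value "h" = true ∧
       PySem.Str.strIsdigit (PySem.Str.slice value none (some (-1))) = true then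
      (PySem.Int.ofStr? (PySem.Str.slice value none (some (-1)))).map (· * 60)
    else if PySem.Str.endswith value "d" = true ∧
       PySem.Str.strIsdigit (PySem.Str.slice value none (some (-1))) = true then
      (PySem.Int.ofStr? (PySem.Str.slice value none (some (-1)))).map (· * 1440)
    else none

def select_primary_interval_py (intervals : List String) : String :=
  let st := intervals.foldl
    (fun (s : Option String × Option Int) interval =>
      match timeframe_minutes interval with
      | none => if s.1 = none then (some interval, s.2) else s
      | some minutes =>
        match s.2 with
        | none => (some interval, some minutes)
        | some bm => if bm < minutes then (some interval, some minutes) else s)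
    (none, none)
  match st.1 with
  | none => ""
  | some b => if b = "" then "" else b    -- 'best or ""'

-- ===== PORT B =====
def timeframe_minutes_alt (timeframe : String) : Option Int :=
  let v := PySem.Str.lower (PySem.Str.strip timeframe)
  if PySem.Str.len v ≠ 0 ∧
     PySem.Str.strIsdigit (PySem.Str.slice v none (some (-1))) = true then
    match PySem.Str.pyGet? v (-1) with
    | some c =>
      match PySem.Dict.get? (PySem.Dict.ofList [('m', (1 : Int)), ('h', 60), ('d', 1440)]) c with
      | some mult => (PySem.Int.ofStr? (PySem.Str.slice v none (some (-1)))).map (· * mult)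
      | none => none
    | none => none
  else none

def select_primary_interval_py_alt (intervals : List String) : String :=
  -- decorated = sorted((-m, i) for i, iv in enumerate(intervals) if m is not None)
  let decorated := PySem.List.sorted2
    ((PySem.List.enumerate intervals).filterMap
      (fun p => (timeframe_minutes_alt p.2).map (fun m => (-m, p.1))))
    (fun t => t.1) (fun t => t.2)
  match decorated with
  | [] =>
    match intervals with
    | [] => ""
    | x :: _ => x
  | t :: _ => (PySem.List.pyGet? intervals t.2).getD ""   -- index always in range; .getD is a totality guard only

-- ===== PRECONDITION & SPEC =====
def Spec_select_primary_interval_py (intervals : List String) (out : String) : Prop := out = select_primary_interval_py_alt intervals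
instance (intervals : List String) (out : String) : Decidable (Spec_select_primary_interval_py intervals out) := by unfold Spec_select_primary_interval_py; infer_instance

-- ===== CLAIM (what is proved, stated in full; the proofs are below) =====
def Claim_equal_select_primary_interval_py : Prop := ∀ (intervals : List String), Dom_select_primary_interval_py intervals → Spec_select_primary_interval_py intervals (select_primary_interval_py intervals)

-- ===== LEMMAS AND PROOFS =====

-- ---- the two helpers agree ----
lemma pyGet_concat (ys : List Char) (c : Char) :
    PySem.List.pyGet? (ys ++ [c]) (-1) = some c := by
  simp [PySem.List.pyGet?, PySem.List.pyIdx?]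

lemma ends_concat (ys : List Char) (c x : Char) :
    PySem.Chars.endswith (ys ++ [c]) [x] = true ↔ c = x := by
  rw [PySem.Chars.endswith_iff]
  constructor
  · rintro ⟨s, hs⟩
    have h2 := congrArg List.getLast? hs
    simp at h2
    exact h2.symm
  · rintro rfl
    exact ⟨ys, rfl⟩

lemma get_m : PySem.Dict.get? (PySem.Dict.ofList [('m', (1 : Int)), ('h', 60), ('d', 1440)]) 'm' = some 1 := rfl
lemma get_h : PySem.Dict.get? (PySem.Dict.ofList [('m', (1 : Int)), ('h', 60), ('d', 1440)]) 'h' = some 60 := rfl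
lemma get_d : PySem.Dict.get? (PySem.Dict.ofList [('m', (1 : Int)), ('h', 60), ('d', 1440)]) 'd' = some 1440 := rfl

lemma get_other (c : Char) (h1 : c ≠ 'm') (h2 : c ≠ 'h') (h3 : c ≠ 'd') :
    PySem.Dict.get? (PySem.Dict.ofList [('m', (1 : Int)), ('h', 60), ('d', 1440)]) c = none := by
  have hit : (PySem.Dict.ofList [('m', (1 : Int)), ('h', 60), ('d', 1440)]).items
      = [('m', (1 : Int)), ('h', 60), ('d', 1440)] := rfl
  simp [PySem.Dict.get?, hit, List.find?, beq_iff_eq, Ne.symm h1,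
    (show ('h' == c) = false by simp [Ne.symm h2]), (show ('d' == c) = false by simp [Ne.symm h3])]

lemma tm_eq (t : String) : timeframe_minutes t = timeframe_minutes_alt t := by
  unfold timeframe_minutes timeframe_minutes_alt
  simp only []
  rcases List.eq_nil_or_concat ((PySem.Str.lower (PySem.Str.strip t)).toList) with h0 | ⟨ys, c, hc⟩
  · -- stripped-lowered value is empty: every branch yields none
    have hL : PySem.Str.len (PySem.Str.lower (PySem.Str.strip t)) = 0 := by
      rw [PySem.Str.len_eq, h0]; rfl
    have e1 : PySem.Str.endswith (PySem.Str.lower (PySem.Str.strip t)) "m" = false := by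
      rw [PySem.Str.endswith_eq, h0]; rfl
    have e2 : PySem.Str.endswith (PySem.Str.lower (PySem.Str.strip t)) "h" = false := by
      rw [PySem.Str.endswith_eq, h0]; rfl
    have e3 : PySem.Str.endswith (PySem.Str.lower (PySem.Str.strip t)) "d" = false := by
      rw [PySem.Str.endswith_eq, h0]; rfl
    have n1 : ¬(PySem.Str.endswith (PySem.Str.lower (PySem.Str.strip t)) "m" = true ∧
        PySem.Str.strIsdigit (PySem.Str.slice (PySem.Str.lower (PySem.Str.strip t)) none (some (-1))) = true) :=
      fun h => by rw [e1] at h; exact Bool.false_ne_true h.1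
    have n2 : ¬(PySem.Str.endswith (PySem.Str.lower (PySem.Str.strip t)) "h" = true ∧
        PySem.Str.strIsdigit (PySem.Str.slice (PySem.Str.lower (PySem.Str.strip t)) none (some (-1))) = true) :=
      fun h => by rw [e2] at h; exact Bool.false_ne_true h.1
    have n3 : ¬(PySem.Str.endswith (PySem.Str.lower (PySem.Str.strip t)) "d" = true ∧
        PySem.Str.strIsdigit (PySem.Str.slice (PySem.Str.lower (PySem.Str.strip t)) none (some (-1))) = true) :=
      fun h => by rw [e3] at h; exact Bool.false_ne_true h.1
    rw [if_neg (fun h : _ ∧ _ => absurd hL h.1)]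
    by_cases ht : PySem.Str.len t = 0
    · rw [if_pos ht]
    · rw [if_neg ht, if_neg n1, if_neg n2, if_neg n3]
  · rw [List.concat_eq_append] at hc
    have ht : PySem.Str.len t ≠ 0 := by
      intro h
      have htl : t.toList = [] := by
        rw [PySem.Str.len_eq] at h
        exact List.eq_nil_of_length_eq_zero (by exact_mod_cast h)
      have hvl : (PySem.Str.lower (PySem.Str.strip t)).toList = [] := by
        rw [PySem.Str.toList_lower, PySem.Str.toList_strip, htl]; rfl
      rw [hc] at hvl; simp at hvl
    have hL : PySem.Str.len (PySem.Str.lower (PySem.Str.strip t)) ≠ 0 := by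
      rw [PySem.Str.len_eq, hc]
      simp only [List.length_append, List.length_cons, List.length_nil]
      omega
    have hget : PySem.Str.pyGet? (PySem.Str.lower (PySem.Str.strip t)) (-1) = some c := by
      rw [PySem.Str.pyGet?_eq, hc]
      simp only [PySem.Chars.pyGet?_eq_listPyGet?]
      exact pyGet_concat ys c
    have em : PySem.Str.endswith (PySem.Str.lower (PySem.Str.strip t)) "m" = true ↔ c = 'm' := by
      rw [PySem.Str.endswith_eq, hc, show ("m").toList = ['m'] from rfl]
      exact ends_concat ys c 'm'
    have eh : PySem.Str.endswith (PySem.Str.lower (PySem.Str.strip t)) "h" = true ↔ c = 'h' := by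
      rw [PySem.Str.endswith_eq, hc, show ("h").toList = ['h'] from rfl]
      exact ends_concat ys c 'h'
    have ed : PySem.Str.endswith (PySem.Str.lower (PySem.Str.strip t)) "d" = true ↔ c = 'd' := by
      rw [PySem.Str.endswith_eq, hc, show ("d").toList = ['d'] from rfl]
      exact ends_concat ys c 'd'
    rw [if_neg ht]
    by_cases hdig : PySem.Str.strIsdigit
        (PySem.Str.slice (PySem.Str.lower (PySem.Str.strip t)) none (some (-1))) = true
    · by_cases hm : c = 'm'
      · rw [if_pos ⟨em.mpr hm, hdig⟩, if_pos ⟨hL, hdig⟩]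
        simp only [hget, hm, get_m]
        cases PySem.Int.ofStr?
            (PySem.Str.slice (PySem.Str.lower (PySem.Str.strip t)) none (some (-1))) <;> simp
      · by_cases hh : c = 'h'
        · rw [if_neg (fun h => hm (em.mp h.1)), if_pos ⟨eh.mpr hh, hdig⟩,
            if_pos ⟨hL, hdig⟩]
          simp only [hget, hh, get_h]
        · by_cases hd : c = 'd'
          · rw [if_neg (fun h => hm (em.mp h.1)), if_neg (fun h => hh (eh.mp h.1)),
              if_pos ⟨ed.mpr hd, hdig⟩, if_pos ⟨hL, hdig⟩]
            simp only [hget, hd, get_d]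
          · rw [if_neg (fun h => hm (em.mp h.1)), if_neg (fun h => hh (eh.mp h.1)),
              if_neg (fun h => hd (ed.mp h.1)), if_pos ⟨hL, hdig⟩]
            simp only [hget, get_other c hm hh hd]
    · rw [if_neg (fun h => hdig h.2), if_neg (fun h => hdig h.2),
        if_neg (fun h => hdig h.2), if_neg (fun h => hdig h.2)]

-- ---- A's loop over the plain valid entries ----
def stepA : (Option String × Option Int) → String → (Option String × Option Int) :=
  fun s interval =>
    match timeframe_minutes interval with
    | none => if s.1 = none then (some interval, s.2) else s
    | some minutes =>
      match s.2 with
      | none => (some interval, some minutes)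
      | some bm => if bm < minutes then (some interval, some minutes) else s

def stepM : Option (String × Int) → (String × Int) → Option (String × Int) :=
  fun acc x =>
    match acc with
    | none => some x
    | some m => if m.2 < x.2 then some x else some m

def validOf (l : List String) : List (String × Int) :=
  l.filterMap (fun iv => (timeframe_minutes iv).map (fun m => (iv, m)))

lemma foldM_some (l : List (String × Int)) (p : String × Int) :
    ∃ q, l.foldl stepM (some p) = some q := by
  induction l generalizing p with
  | nil => exact ⟨p, rfl⟩
  | cons x t ih =>
    simp only [List.foldl_cons, stepM]
    split_ifs <;> exact ih _

lemma foldA_some_some (l : List String) (b : String) (m : Int) :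
    l.foldl stepA (some b, some m) =
      match (validOf l).foldl stepM (some (b, m)) with
      | some q => (some q.1, some q.2)
      | none => (none, none) := by
  induction l generalizing b m with
  | nil => rfl
  | cons x t ih =>
    simp only [List.foldl_cons, validOf, List.filterMap_cons]
    cases h : timeframe_minutes x with
    | none =>
      simp only [stepA, h]
      exact ih b m
    | some k =>
      simp only [stepA, h, Option.map_some, List.foldl_cons, stepM]
      split_ifs with hlt
      · exact ih x k
      · exact ih b m

lemma foldA_some_none (l : List String) (b : String) :
    l.foldl stepA (some b, none) =
      match (validOf l).foldl stepM none with
      | none => (some b, none)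
      | some q => (some q.1, some q.2) := by
  induction l generalizing b with
  | nil => rfl
  | cons x t ih =>
    simp only [List.foldl_cons, validOf, List.filterMap_cons]
    cases h : timeframe_minutes x with
    | none =>
      simp only [stepA, h]
      exact ih b
    | some k =>
      simp only [stepA, h, Option.map_some, List.foldl_cons, stepM]
      obtain ⟨q, hq⟩ := foldM_some (validOf t) (x, k)
      rw [foldA_some_some t x k]
      simp only [validOf] at hq ⊢
      rw [hq]

lemma portA_foldl (l : List String) :
    select_primary_interval_py l =
      match (l.foldl stepA (none, none)).1 with
      | none => ""
      | some b => if b = "" then "" else b := rfl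

lemma or_empty (b : String) : (if b = "" then "" else b) = b := by
  split_ifs with h
  · exact h.symm
  · rfl

-- A's value, characterised by the fold over the valid entries
lemma A_char (l : List String) :
    select_primary_interval_py l =
      match (validOf l).foldl stepM none with
      | some q => if q.1 = "" then "" else q.1
      | none =>
        match l with
        | [] => ""
        | x :: _ => x := by
  rw [portA_foldl]
  cases l with
  | nil => rfl
  | cons x t =>
    cases h : timeframe_minutes x with
    | none =>
      have hv : validOf (x :: t) = validOf t := by
        simp [validOf, h]
      simp only [List.foldl_cons, stepA, h, reduceIte, hv]
      rw [foldA_some_none t x]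
      cases hq : (validOf t).foldl stepM none with
      | none => exact or_empty x
      | some q => rfl
    | some k =>
      have hv : validOf (x :: t) = (x, k) :: validOf t := by
        simp [validOf, h]
      simp only [List.foldl_cons, stepA, h, hv, stepM]
      obtain ⟨q, hq⟩ := foldM_some (validOf t) (x, k)
      rw [foldA_some_some t x k]
      simp only [validOf] at hq ⊢
      rw [hq]

-- ---- the enumerated valid entries (index, interval, minutes) ----
def enumValid : Int → List String → List (Int × String × Int)
  | _, [] => []
  | i, x :: t =>
    match timeframe_minutes x with
    | some m => (i, x, m) :: enumValid (i + 1) t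
    | none => enumValid (i + 1) t

-- the same maximum fold on enumerated entries (keeps the earlier entry on ties)
def stepE : (Int × String × Int) → (Int × String × Int) → (Int × String × Int) :=
  fun a x => if a.2.2 < x.2.2 then x else a

def projE (e : Int × String × Int) : String × Int := (e.2.1, e.2.2)

def pairE (e : Int × String × Int) : Int × Int := (-e.2.2, e.1)

lemma validOf_eq_map (l : List String) (s : Int) :
    validOf l = (enumValid s l).map projE := by
  induction l generalizing s with
  | nil => rfl
  | cons x t ih =>
    simp only [validOf, List.filterMap_cons, enumValid]
    cases h : timeframe_minutes x with
    | none => simpa [validOf] using ih (s + 1)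
    | some m => simp only [Option.map_some, List.map_cons, projE]; simpa [validOf] using ih (s + 1)

lemma foldM_map (E : List (Int × String × Int)) (a : Int × String × Int) :
    (E.map projE).foldl stepM (some (projE a)) = some (projE (E.foldl stepE a)) := by
  induction E generalizing a with
  | nil => rfl
  | cons x t ih =>
    simp only [List.map_cons, List.foldl_cons, stepM, stepE, projE]
    split_ifs with h
    · exact ih x
    · exact ih a

lemma enumValid_pairwise (l : List String) (s : Int) :
    (∀ e ∈ enumValid s l, s ≤ e.1) ∧
      (enumValid s l).Pairwise (fun p q => p.1 < q.1) := by
  induction l generalizing s with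
  | nil => exact ⟨by simp [enumValid], by simp [enumValid]⟩
  | cons x t ih =>
    simp only [enumValid]
    cases h : timeframe_minutes x with
    | none =>
      obtain ⟨h1, h2⟩ := ih (s + 1)
      exact ⟨fun e he => le_trans (by omega) (h1 e he), h2⟩
    | some m =>
      obtain ⟨h1, h2⟩ := ih (s + 1)
      refine ⟨?_, List.pairwise_cons.mpr ⟨?_, h2⟩⟩
      · intro e he
        rcases List.mem_cons.mp he with rfl | he'
        · exact le_refl _
        · exact le_trans (by omega) (h1 e he')
      · intro q hq
        have := h1 q hq
        omega

lemma enumValid_mem (l : List String) (s : Int) (e : Int × String × Int)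
    (he : e ∈ enumValid s l) :
    timeframe_minutes e.2.1 = some e.2.2 ∧ ∃ k : Nat, e.1 = s + k ∧ l[k]? = some e.2.1 := by
  induction l generalizing s with
  | nil => simp [enumValid] at he
  | cons x t ih =>
    simp only [enumValid] at he
    cases h : timeframe_minutes x with
    | none =>
      rw [h] at he
      obtain ⟨h1, k, hk, hg⟩ := ih (s + 1) he
      exact ⟨h1, k + 1, by omega, by simpa using hg⟩
    | some m =>
      rw [h] at he
      rcases List.mem_cons.mp he with rfl | he'
      · exact ⟨h, 0, by omega, rfl⟩
      · obtain ⟨h1, k, hk, hg⟩ := ih (s + 1) he'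
        exact ⟨h1, k + 1, by omega, by simpa using hg⟩

-- the fold result is the unique lexicographic minimum of the (-minutes, index) keys
lemma foldE_min (E : List (Int × String × Int)) (a : Int × String × Int)
    (hp : (a :: E).Pairwise (fun p q => p.1 < q.1)) :
    E.foldl stepE a ∈ a :: E ∧
      ∀ y ∈ a :: E, (toLex (pairE (E.foldl stepE a)) : Lex (Int × Int)) ≤ toLex (pairE y) := by
  induction E generalizing a with
  | nil =>
    exact ⟨List.mem_singleton.mpr rfl, by
      intro y hy
      rcases List.mem_singleton.mp hy with rfl
      exact le_refl _⟩
  | cons x t ih =>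
    obtain ⟨ha, hp'⟩ := List.pairwise_cons.mp hp
    obtain ⟨hx, hp''⟩ := List.pairwise_cons.mp hp'
    have hax : a.1 < x.1 := ha x (List.mem_cons_self)
    have hstep_mem : stepE a x = a ∨ stepE a x = x := by
      unfold stepE; split_ifs <;> simp
    have hstep_pair : ((stepE a x) :: t).Pairwise (fun p q => p.1 < q.1) := by
      refine List.pairwise_cons.mpr ⟨?_, hp''⟩
      intro q hq
      rcases hstep_mem with h | h <;> rw [h]
      · exact lt_trans hax (hx q hq)
      · exact hx q hq
    obtain ⟨hmem, hmin⟩ := ih (stepE a x) hstep_pair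
    have hle_a : (toLex (pairE (stepE a x)) : Lex (Int × Int)) ≤ toLex (pairE a) := by
      unfold stepE pairE
      split_ifs with h
      · exact le_of_lt (Prod.Lex.toLex_lt_toLex.mpr (Or.inl (by omega)))
      · exact le_refl _
    have hle_x : (toLex (pairE (stepE a x)) : Lex (Int × Int)) ≤ toLex (pairE x) := by
      unfold stepE pairE
      split_ifs with h
      · exact le_refl _
      · rcases lt_or_eq_of_le (show -a.2.2 ≤ -x.2.2 by omega) with h2 | h2
        · exact le_of_lt (Prod.Lex.toLex_lt_toLex.mpr (Or.inl h2))
        · exact le_of_lt (Prod.Lex.toLex_lt_toLex.mpr (Or.inr ⟨h2, hax⟩))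
    constructor
    · simp only [List.foldl_cons]
      rcases List.mem_cons.mp hmem with h | h
      · rw [h]
        rcases hstep_mem with h' | h' <;> rw [h'] <;> simp
      · exact List.mem_cons.mpr (Or.inr (List.mem_cons.mpr (Or.inr h)))
    · intro y hy
      simp only [List.foldl_cons]
      have hle_step : (toLex (pairE ((t.foldl stepE (stepE a x)))) : Lex (Int × Int)) ≤
          toLex (pairE (stepE a x)) := hmin _ (List.mem_cons_self)
      rcases List.mem_cons.mp hy with rfl | hy'
      · exact le_trans hle_step hle_a
      · rcases List.mem_cons.mp hy' with rfl | hy'' 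
        · exact le_trans hle_step hle_x
        · exact hmin y (List.mem_cons.mpr (Or.inr hy''))

-- a parseable timeframe is a nonempty string
lemma tm_ne_empty (t : String) (m : Int) (h : timeframe_minutes t = some m) : t ≠ "" := by
  intro rfl_t
  rw [rfl_t] at h
  simp [timeframe_minutes, PySem.Str.len_eq] at h

-- ---- B side: sorted2 on pairs is sorting by the lexicographic key ----
lemma before_eq :
    (fun (a b : Int × Int) =>
        (decide (a.1 < b.1) || (!decide (b.1 < a.1) && decide (a.2 < b.2)))) =
      fun a b => decide ((toLex a : Lex (Int × Int)) < toLex b) := by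
  funext a b
  simp only [Prod.Lex.toLex_lt_toLex]
  rcases lt_trichotomy a.1 b.1 with h | h | h
  · simp [h, not_lt.mpr (le_of_lt h)]
  · simp [h]
  · simp [not_lt.mpr (le_of_lt h), h, ne_of_gt h]

lemma sorted2_eq_sorted_lex (xs : List (Int × Int)) :
    PySem.List.sorted2 xs (fun t => t.1) (fun t => t.2) =
      PySem.List.sorted xs (fun t => (toLex t : Lex (Int × Int))) := by
  have h0 : PySem.List.sorted2 xs (fun t => t.1) (fun t => t.2) =
      List.foldl (fun acc x => PySem.List.insertBy
        (fun a b => (decide (a.1 < b.1) || (!decide (b.1 < a.1) && decide (a.2 < b.2))))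
        x acc) [] xs := rfl
  rw [PySem.List.sorted_eq_foldl_insertBy, h0, before_eq]

lemma sorted_head_min (xs : List (Int × Int)) (h : Int × Int) (tl : List (Int × Int))
    (hs : PySem.List.sorted xs (fun t => (toLex t : Lex (Int × Int))) = h :: tl) :
    h ∈ xs ∧ ∀ y ∈ xs, (toLex h : Lex (Int × Int)) ≤ toLex y := by
  have hperm := PySem.List.sorted_perm xs (fun t => (toLex t : Lex (Int × Int))) false
  rw [hs] at hperm
  have hpw := PySem.List.sorted_pairwise xs (fun t => (toLex t : Lex (Int × Int)))
  rw [hs] at hpw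
  obtain ⟨hhd, _⟩ := List.pairwise_cons.mp hpw
  refine ⟨hperm.mem_iff.mp List.mem_cons_self, ?_⟩
  intro y hy
  rcases List.mem_cons.mp (hperm.symm.mem_iff.mp hy) with rfl | hy'
  · exact le_refl _
  · exact hhd y hy'

-- B's decorated list is the image of the enumerated valid entries
lemma decorated_eq (l : List String) (s : Int) :
    (PySem.List.enumerate l s).filterMap
        (fun p => (timeframe_minutes_alt p.2).map (fun m => (-m, p.1))) =
      (enumValid s l).map pairE := by
  induction l generalizing s with
  | nil => rfl
  | cons x t ih =>
    show ((s, x) :: PySem.List.enumerate t (s + 1)).filterMap _ = _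
    rw [List.filterMap_cons]
    cases h : timeframe_minutes x with
    | none =>
      have h' : timeframe_minutes_alt x = none := by rw [← tm_eq, h]
      rw [h', show enumValid s (x :: t) = enumValid (s + 1) t from by simp [enumValid, h]]
      exact ih (s + 1)
    | some m =>
      have h' : timeframe_minutes_alt x = some m := by rw [← tm_eq, h]
      rw [h', show enumValid s (x :: t) = (s, x, m) :: enumValid (s + 1) t from by
        simp [enumValid, h]]
      simp only [Option.map_some, List.map_cons, pairE]
      rw [ih (s + 1)]

-- ===== VERDICT (by name: the statement is the Claim_ definition above) =====
theorem select_primary_interval_py_spec : Claim_equal_select_primary_interval_py := by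
  intro l _
  unfold Spec_select_primary_interval_py
  rw [A_char]
  show _ = select_primary_interval_py_alt l
  unfold select_primary_interval_py_alt
  rw [decorated_eq l 0]
  cases hE : enumValid 0 l with
  | nil =>
    have hv : validOf l = [] := by rw [validOf_eq_map l 0, hE]; rfl
    rw [hv]
    rfl
  | cons a E =>
    -- A's side: the fold picks r, the first maximum by minutes
    have hv : validOf l = projE a :: E.map projE := by
      rw [validOf_eq_map l 0, hE]; rfl
    have hfold : (validOf l).foldl stepM none = some (projE (E.foldl stepE a)) := by
      rw [hv]
      show (E.map projE).foldl stepM (stepM none (projE a)) = _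
      rw [show stepM none (projE a) = some (projE a) from rfl]
      exact foldM_map E a
    set r := E.foldl stepE a with hr
    obtain ⟨_, hpw⟩ := enumValid_pairwise l 0
    rw [hE] at hpw
    obtain ⟨hrmem, hrmin⟩ := foldE_min E a hpw
    obtain ⟨hrtm, k, hk, hget⟩ := enumValid_mem l 0 r (hE ▸ hrmem)
    have hrne : r.2.1 ≠ "" := tm_ne_empty _ _ hrtm
    rw [hfold]
    simp only [projE]
    rw [if_neg hrne]
    -- B's side: the sorted head is the same entry
    rw [sorted2_eq_sorted_lex]
    cases hs : PySem.List.sorted ((a :: E).map pairE)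
        (fun t => (toLex t : Lex (Int × Int))) with
    | nil =>
      exfalso
      have := PySem.List.sorted_perm ((a :: E).map pairE)
        (fun t => (toLex t : Lex (Int × Int))) false
      rw [hs] at this
      simpa using this.length_eq
    | cons h tl =>
      obtain ⟨hhmem, hhmin⟩ := sorted_head_min _ h tl hs
      obtain ⟨e, hemem, hepair⟩ := List.mem_map.mp hhmem
      have h1 : (toLex h : Lex (Int × Int)) ≤ toLex (pairE r) :=
        hhmin _ (List.mem_map.mpr ⟨r, hrmem, rfl⟩)
      have h2 : (toLex (pairE r) : Lex (Int × Int)) ≤ toLex h := by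
        rw [← hepair]
        exact hrmin e hemem
      have hpr : h = pairE r := toLex.injective (le_antisymm h1 h2)
      have hidx : h.2 = r.1 := by rw [hpr]; rfl
      show r.2.1 = (PySem.List.pyGet? l h.2).getD ""
      rw [hidx]
      have : PySem.List.pyGet? l r.1 = some r.2.1 := by
        rw [show r.1 = (k : Int) by omega, PySem.List.pyGet?_natCast, hget]
      rw [this]
      rfl
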